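-- pv_equiv track=rewrite | github.com/orlandocurioso-gh/Attestati | Moduli/controllaLaLista.py | controllaApostrofo
-- ===== SOURCE A (Python) =====
-- def dividi_stringa_maiuscole(stringa):
--   """
--   Divide una stringa in sottostringhe, separando ogni volta che incontra un carattere maiuscolo (senza regex).
--   """
--   sottostringhe = []
--   inizio = 0
--   for i in range(1, len(stringa)):
--       if stringa[i].isupper():
--           sottostringhe.append(stringa[inizio:i])
--           inizio = i
--   sottostringhe.append(stringa[inizio:])
--   return sottostringhe
--
-- def controllaApostrofo(lista):
--     nome=''
--     citta=''
--     token=lista[0]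
--     if "'" in token:
--         apostrofi=token.count("'")
--         match apostrofi:
--             case 2:
--                 listaDivisa=dividi_stringa_maiuscole(token)
--                 i=0
--                 for elmeneto in listaDivisa:
--                     if i<2:
--                         nome=nome+listaDivisa[i]
--                     else:
--                         citta=citta+listaDivisa[i]
--                     i=i+1
--                 lista.pop(0)
--                 lista.insert(0,nome)
--                 lista.insert(1,citta)
--                 #print (lista)
--     else:
--         pass
--     return lista
-- ===== SOURCE B (Python) =====
-- def controllaApostrofo(lista):
--     token = lista[0]
--     if "'" in token and token.count("'") == 2:
--         # single scan: find the index of the SECOND uppercase char at position >= 1;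
--         # default to len(token) when there are fewer than two.
--         split = len(token)
--         seen = 0
--         for i in range(1, len(token)):
--             if token[i].isupper():
--                 seen += 1
--                 if seen == 2:
--                     split = i
--                     break
--         lista[0:1] = [token[:split], token[split:]]
--     return lista
-- ===== Notes on version B (the rewrite author's own statement) =====
-- stated objective: simpler
-- what changed: Instead of building every uppercase-delimited substring and bucketing them into nome/citta with a counter loop, B scans the token once for the second uppercase character at index >= 1 (with early exit) and uses that position as a single split point for take/drop; both versions mutate lista in place the same way.
import Mathlib
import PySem

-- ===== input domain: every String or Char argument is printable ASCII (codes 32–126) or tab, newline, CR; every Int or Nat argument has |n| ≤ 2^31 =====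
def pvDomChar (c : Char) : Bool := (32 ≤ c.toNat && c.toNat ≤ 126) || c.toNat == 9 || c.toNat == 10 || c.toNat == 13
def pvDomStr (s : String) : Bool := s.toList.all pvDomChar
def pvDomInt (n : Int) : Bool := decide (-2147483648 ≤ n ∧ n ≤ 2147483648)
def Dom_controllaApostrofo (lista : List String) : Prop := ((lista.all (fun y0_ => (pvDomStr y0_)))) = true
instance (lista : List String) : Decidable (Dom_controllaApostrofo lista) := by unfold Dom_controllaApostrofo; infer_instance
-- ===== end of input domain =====

-- B replaces A's build-all-uppercase-pieces-then-bucket pass by a single scan for the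
-- second uppercase index used as one split point (objective: simpler). Both Pythons
-- mutate `lista` in place in the same way; the theorems are about the returned list.

-- ===== PORT A =====
-- loop body of dividi_stringa_maiuscole: 'if stringa[i].isupper(): sottostringhe.append(stringa[inizio:i]); inizio = i'
def dividiStep (cs : List Char) (s : List (List Char) × Int) (i : Int) : List (List Char) × Int :=
  if PySem.Chars.isupper (PySem.List.pyGetD cs i ' ') then
    (s.1 ++ [PySem.List.slice cs (some s.2) (some i)], i)
  else s

-- dividi_stringa_maiuscole, on the code points of the string
def dividiStringaMaiuscole (cs : List Char) : List (List Char) :=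
  let st := (PySem.List.pyRange 1 (cs.length : Int) 1).foldl (dividiStep cs) ([], 0)
  st.1 ++ [PySem.List.slice cs (some st.2) none]

-- loop body of 'for elmeneto in listaDivisa: …; i = i + 1' (listaDivisa[i] is the
-- current element, since i is exactly the loop counter)
def bucketStep (s : (List Char × List Char) × Int) (p : List Char) : (List Char × List Char) × Int :=
  if s.2 < 2 then ((s.1.1 ++ p, s.1.2), s.2 + 1) else ((s.1.1, s.1.2 ++ p), s.2 + 1)

def controllaApostrofo (lista : List String) : List String :=
  match PySem.List.pyGet? lista 0 with
  | none => lista          -- lista[0] raises IndexError: excluded by Pre_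
  | some token =>
    if PySem.Str.isIn "'" token then
      if PySem.Str.count token "'" = 2 then
        let listaDivisa := dividiStringaMaiuscole token.toList
        let st := listaDivisa.foldl bucketStep (([], []), 0)
        let rest := ((PySem.List.pop? lista 0).map (·.2)).getD []   -- lista.pop(0)
        PySem.List.insert (PySem.List.insert rest 0 (String.ofList st.1.1)) 1 (String.ofList st.1.2)
      else lista
    else lista

-- ===== PORT B =====
-- single scan: index of the SECOND uppercase char (positions counted from `pos`), with early exit
def findSecondUpper : List Char → Nat → Nat → Option Nat
  | [], _, _ => none
  | c :: rest, pos, seen =>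
    if PySem.Chars.isupper c then
      if seen + 1 = 2 then some pos
      else findSecondUpper rest (pos + 1) (seen + 1)
    else findSecondUpper rest (pos + 1) seen

def controllaApostrofo_alt (lista : List String) : List String :=
  match lista with
  | [] => []               -- lista[0] raises IndexError: excluded by Pre_
  | token :: rest =>
    if PySem.Str.isIn "'" token && (PySem.Str.count token "'" == 2) then
      let cs := token.toList
      let split := (findSecondUpper cs.tail 1 0).getD cs.length
      String.ofList (cs.take split) :: String.ofList (cs.drop split) :: rest
    else token :: rest

-- ===== PRECONDITION & SPEC =====
-- Pre_ excludes only the empty list, on which both A and B raise IndexError at lista[0].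
def Pre_controllaApostrofo (lista : List String) : Prop := lista ≠ []
instance (lista : List String) : Decidable (Pre_controllaApostrofo lista) := by
  unfold Pre_controllaApostrofo; infer_instance
def pvWitness_controllaApostrofo : List String := ["Gio'Va'Roma", "2024"]

def Spec_controllaApostrofo (lista : List String) (out : List String) : Prop := out = controllaApostrofo_alt lista
instance (lista : List String) (out : List String) : Decidable (Spec_controllaApostrofo lista out) := by unfold Spec_controllaApostrofo; infer_instance

-- ===== CLAIM (what is proved, stated in full; the proofs are below) =====
def Claim_equal_controllaApostrofo : Prop := ∀ (lista : List String), Dom_controllaApostrofo lista → Pre_controllaApostrofo lista → Spec_controllaApostrofo lista (controllaApostrofo lista)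

-- ===== LEMMAS AND PROOFS =====

-- uppercase positions of a char list, counted from `p`
def upsL : List Char → Nat → List Nat
  | [], _ => []
  | c :: r, p => if PySem.Chars.isupper c then p :: upsL r (p + 1) else upsL r (p + 1)

-- the pieces A's splitter produces for cut points `us`, starting at `z`
def piecesOf (cs : List Char) : List Nat → Nat → List (List Char)
  | [], _ => []
  | u :: rest, z => (cs.drop z).take (u - z) :: piecesOf cs rest u

theorem getLastD_cons' (a d : Nat) (l : List Nat) : (a :: l).getLastD d = l.getLastD a := by
  cases l <;> simp [List.getLastD]

theorem chain_le_of_le {a b : Nat} {l : List Nat} (h : a ≤ b)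
    (hc : List.IsChain (· ≤ ·) (b :: l)) : List.IsChain (· ≤ ·) (a :: l) := by
  cases l with
  | nil => exact List.IsChain.singleton a
  | cons x t =>
    rw [List.isChain_cons_cons] at hc ⊢
    exact ⟨le_trans h hc.1, hc.2⟩

theorem upsL_chain (l : List Char) (p : Nat) : List.IsChain (· ≤ ·) (p :: upsL l p) := by
  induction l generalizing p with
  | nil => exact List.IsChain.singleton p
  | cons c r ih =>
    simp only [upsL]
    split
    · rw [List.isChain_cons_cons]
      exact ⟨le_refl p, chain_le_of_le (Nat.le_succ p) (ih (p + 1))⟩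
    · exact chain_le_of_le (Nat.le_succ p) (ih (p + 1))

theorem flatten_piecesOf (cs : List Char) (us : List Nat) (z : Nat)
    (h : List.IsChain (· ≤ ·) (z :: us)) :
    (piecesOf cs us z).flatten ++ cs.drop (us.getLastD z) = cs.drop z := by
  induction us generalizing z with
  | nil => simp [piecesOf]
  | cons u rest ih =>
    rw [List.isChain_cons_cons] at h
    rw [getLastD_cons', piecesOf]
    have hdrop : cs.drop u = ((cs.drop z).drop (u - z)) := by
      rw [List.drop_drop]; congr 1; omega
    calc ((cs.drop z).take (u - z) :: piecesOf cs rest u).flatten ++ cs.drop (rest.getLastD u)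
        = (cs.drop z).take (u - z) ++ ((piecesOf cs rest u).flatten ++ cs.drop (rest.getLastD u)) := by
          simp [List.flatten_cons, List.append_assoc]
      _ = (cs.drop z).take (u - z) ++ cs.drop u := by rw [ih u h.2]
      _ = cs.drop z := by rw [hdrop, List.take_append_drop]

-- A's range-fold, started anywhere, in terms of the uppercase positions of the rest
theorem dividi_fold_from (cs : List Char) :
    ∀ (k m : Nat), m + k = cs.length → 1 ≤ m → ∀ (P : List (List Char)) (z : Nat),
    (PySem.List.pyRange (m : Int) (cs.length : Int) 1).foldl (dividiStep cs) (P, (z : Int)) =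
      (P ++ piecesOf cs (upsL (cs.drop m) m) z, ((upsL (cs.drop m) m).getLastD z : Int)) := by
  intro k
  induction k with
  | zero =>
    intro m hm _ P z
    have hmn : m = cs.length := by omega
    subst hmn
    rw [PySem.List.pyRange_one_eq_nil (le_refl _)]
    simp [upsL, piecesOf]
  | succ k ih =>
    intro m hm hm1 P z
    have hlt : m < cs.length := by omega
    rw [PySem.List.pyRange_one_cons (by exact_mod_cast hlt)]
    have hdrop : cs.drop m = cs[m] :: cs.drop (m + 1) := List.drop_eq_getElem_cons hlt
    have hget : PySem.List.pyGetD cs (m : Int) ' ' = cs[m] := by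
      rw [PySem.List.pyGetD_natCast]; exact List.getD_eq_getElem _ _ hlt
    have hcast : ((m : Int) + 1) = ((m + 1 : Nat) : Int) := by push_cast; ring
    rw [List.foldl_cons]
    by_cases hu : PySem.Chars.isupper cs[m]
    · have hstep : dividiStep cs (P, (z : Int)) (m : Int) =
          (P ++ [(cs.drop z).take (m - z)], (m : Int)) := by
        simp only [dividiStep, hget, hu, if_true]
        congr 2
        rw [PySem.List.slice_natCast]
      rw [hstep, hcast, ih (m + 1) (by omega) (by omega)]
      rw [hdrop]
      simp only [upsL, hu, if_true, piecesOf, getLastD_cons']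
      simp [List.append_assoc]
    · have hstep : dividiStep cs (P, (z : Int)) (m : Int) = (P, (z : Int)) := by
        simp [dividiStep, hget, hu]
      rw [hstep, hcast, ih (m + 1) (by omega) (by omega)]
      rw [hdrop]
      simp [upsL, hu]

-- the bucket fold, once the counter has reached 2, dumps everything into citta
theorem bucket_ge2 (l : List (List Char)) :
    ∀ (a b : List Char) (j : Int), 2 ≤ j →
    l.foldl bucketStep ((a, b), j) = ((a, b ++ l.flatten), j + l.length) := by
  induction l with
  | nil => intro a b j _; simp
  | cons p r ih =>
    intro a b j hj
    rw [List.foldl_cons]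
    have : bucketStep ((a, b), j) p = ((a, b ++ p), j + 1) := by
      simp only [bucketStep]; rw [if_neg (by omega)]
    rw [this, ih a (b ++ p) (j + 1) (by omega)]
    simp [List.append_assoc]
    omega

-- B's scan finds the head of upsL when one uppercase has been seen …
theorem fsu_one (l : List Char) : ∀ (p : Nat), findSecondUpper l p 1 = (upsL l p).head? := by
  induction l with
  | nil => intro p; simp [findSecondUpper, upsL]
  | cons c r ih =>
    intro p
    simp only [findSecondUpper, upsL]
    by_cases hu : PySem.Chars.isupper c <;> simp [hu, ih]

-- … and the second element of upsL when none has
theorem fsu_zero (l : List Char) : ∀ (p : Nat), findSecondUpper l p 0 = (upsL l p)[1]? := by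
  induction l with
  | nil => intro p; simp [findSecondUpper, upsL]
  | cons c r ih =>
    intro p
    simp only [findSecondUpper, upsL]
    by_cases hu : PySem.Chars.isupper c <;> simp [hu, ih, fsu_one, List.head?_eq_getElem?]

-- the heart: on a nonempty token, nome/citta computed by A are B's take/drop at the split point
theorem core_eq (cs : List Char) (hne : cs ≠ []) :
    ((dividiStringaMaiuscole cs).foldl bucketStep (([], []), 0)).1 =
      (cs.take ((findSecondUpper cs.tail 1 0).getD cs.length),
       cs.drop ((findSecondUpper cs.tail 1 0).getD cs.length)) := by
  have h1 : 1 ≤ cs.length := by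
    cases cs with
    | nil => exact absurd rfl hne
    | cons _ _ => simp
  have htail : cs.drop 1 = cs.tail := List.drop_one
  have hfold := dividi_fold_from cs (cs.length - 1) 1 (by omega) (le_refl 1) [] 0
  rw [htail] at hfold
  rw [fsu_zero]
  set us := upsL cs.tail 1 with hus
  have hchain : List.IsChain (· ≤ ·) (0 :: us) := chain_le_of_le (by omega) (upsL_chain cs.tail 1)
  have hpieces : dividiStringaMaiuscole cs =
      piecesOf cs us 0 ++ [cs.drop (us.getLastD 0)] := by
    push_cast at hfold
    unfold dividiStringaMaiuscole
    rw [hfold]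
    simp [PySem.List.slice_from_natCast]
  rw [hpieces]
  match us, hchain with
  | [], _ =>
    simp only [piecesOf, List.getLastD, List.nil_append, List.getElem?_nil]
    simp [bucketStep, List.take_length]
  | [u], _ =>
    simp only [piecesOf, List.getLastD, List.getElem?_cons_succ,
      List.getElem?_nil, Option.getD_none]
    simp only [List.cons_append, List.nil_append, List.foldl_cons, List.foldl_nil]
    simp [bucketStep, List.take_append_drop, List.take_length]
  | u1 :: u2 :: rest, hch =>
    rw [List.isChain_cons_cons] at hch
    have hch2 := hch.2
    rw [List.isChain_cons_cons] at hch2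
    simp only [piecesOf, getLastD_cons']
    simp only [List.cons_append, List.foldl_cons]
    have s1 : bucketStep (([], []), 0) ((cs.drop 0).take (u1 - 0)) =
        ((cs.take u1, []), 1) := by simp [bucketStep]
    have s2 : bucketStep ((cs.take u1, []), 1) ((cs.drop u1).take (u2 - u1)) =
        ((cs.take u1 ++ (cs.drop u1).take (u2 - u1), []), 2) := by simp [bucketStep]
    rw [s1, s2, bucket_ge2 _ _ _ 2 (le_refl 2)]
    have hnome : cs.take u1 ++ (cs.drop u1).take (u2 - u1) = cs.take u2 := by
      have h12 : u2 = u1 + (u2 - u1) := by omega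
      conv_rhs => rw [h12, List.take_add]
    have hcitta : (piecesOf cs rest u2 ++ [cs.drop (rest.getLastD u2)]).flatten
        = cs.drop u2 := by
      rw [List.flatten_append]
      simpa using flatten_piecesOf cs rest u2 hch2.2
    simp only [List.getElem?_cons_succ, List.getElem?_cons_zero, Option.getD_some]
    rw [hnome, hcitta]
    simp

-- ===== VERDICT (by name: the statement is the Claim_ definition above) =====
theorem controllaApostrofo_spec : Claim_equal_controllaApostrofo := by
  intro lista _ hpre
  unfold Spec_controllaApostrofo
  match lista with
  | [] => exact absurd rfl hpre
  | token :: rest =>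
    unfold controllaApostrofo controllaApostrofo_alt
    rw [PySem.List.pyGet?_zero_cons]
    simp only
    by_cases hin : PySem.Str.isIn "'" token
    · by_cases hcnt : PySem.Str.count token "'" = 2
      · rw [if_pos hin, if_pos hcnt, if_pos (by rw [hin, hcnt]; decide)]
        have hne : token.toList ≠ [] := by
          intro h
          have hin' : PySem.Chars.isIn ['\''] token.toList = true := by simpa using hin
          rw [h] at hin'
          exact absurd hin' (by decide)
        have hc := core_eq token.toList hne
        simp only [PySem.List.pop?_zero_cons, Option.map_some, Option.getD_some]
        rw [PySem.List.insert_zero]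
        rw [PySem.List.insert_ofNat _ 1 _ (by simp)]
        rw [hc]
        simp
      · rw [if_pos hin, if_neg hcnt, if_neg (by
          rw [hin]
          simp only [Bool.true_and, beq_iff_eq]
          exact hcnt)]
    · rw [if_neg hin, if_neg (by
        simp only [Bool.and_eq_true]
        exact fun h => hin h.1)]
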